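-- pv_equiv track=rewrite | github.com/andrescg07/tricky | tricky.py | actualizar_tablero
-- ===== SOURCE A (Python) =====
-- primer_lista = ['1', '2', '3']
--
-- segunda_lista = ['4', '5', '6']
--
-- tercer_lista = ['7', '8', '9']
--
-- def actualizar_tablero(tabla, posicion, valor):
--
--     c = 0
--     indice = 0
--
--     for fila in tabla:
--         if c == 0 and posicion in primer_lista:
--             indice = primer_lista.index(posicion)
--             tabla[c][indice] = valor
--         elif c == 1 and posicion in segunda_lista:
--             indice = segunda_lista.index(posicion)
--             tabla[c][indice] = valor
--         elif c == 2 and posicion in tercer_lista: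
--             indice = tercer_lista.index(posicion)
--             tabla[c][indice] = valor
--         c += 1
--     return tabla
-- ===== SOURCE B (Python) =====
-- _POS = {'1': (0, 0), '2': (0, 1), '3': (0, 2),
--         '4': (1, 0), '5': (1, 1), '6': (1, 2),
--         '7': (2, 0), '8': (2, 1), '9': (2, 2)}
--
-- def actualizar_tablero(tabla, posicion, valor):
--     rc = _POS.get(posicion)
--     if rc is not None and rc[0] < len(tabla):
--         tabla[rc[0]][rc[1]] = valor
--     return tabla
-- ===== Notes on version B (the rewrite author's own statement) =====
-- stated objective: simpler
-- what changed: Replaces the row loop with three membership tests and list.index scans per row by a single dict lookup mapping each valid position to its (row, col) coordinate, followed by one guarded assignment.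
import Mathlib
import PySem

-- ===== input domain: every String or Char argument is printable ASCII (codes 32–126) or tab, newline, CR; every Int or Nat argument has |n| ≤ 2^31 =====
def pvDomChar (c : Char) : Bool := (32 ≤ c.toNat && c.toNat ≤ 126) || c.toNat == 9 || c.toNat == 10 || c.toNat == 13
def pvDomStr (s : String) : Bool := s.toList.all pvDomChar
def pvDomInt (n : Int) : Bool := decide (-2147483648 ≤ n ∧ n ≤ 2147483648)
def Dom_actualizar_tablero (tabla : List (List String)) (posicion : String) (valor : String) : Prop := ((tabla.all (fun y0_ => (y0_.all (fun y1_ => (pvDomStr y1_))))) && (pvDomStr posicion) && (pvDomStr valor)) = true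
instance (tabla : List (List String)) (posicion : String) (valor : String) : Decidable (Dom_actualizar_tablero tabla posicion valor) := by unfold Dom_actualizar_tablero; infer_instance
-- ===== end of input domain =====

-- B replaces A's row loop (three membership tests + list.index per row) by a single
-- position→(row,col) dictionary lookup and one guarded assignment (objective: simpler).
-- Both Pythons mutate `tabla` in place identically; the theorems are about the returned value.

-- ===== PORT A =====
def pvPrimer : List String := ["1", "2", "3"]
def pvSegunda : List String := ["4", "5", "6"]
def pvTercer : List String := ["7", "8", "9"]

-- one iteration of A's `for fila in tabla` loop; state = (tabla, c); `fila` is unused by A's body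
def pvStepA (posicion valor : String) (st : List (List String) × Nat)
    (_fila : List String) : List (List String) × Nat :=
  let t := st.1
  let c := st.2
  if c = 0 ∧ pvPrimer.contains posicion then
    (t.set c ((t.getD c []).set ((PySem.List.index? pvPrimer posicion).getD 0) valor), c + 1)
  else if c = 1 ∧ pvSegunda.contains posicion then
    (t.set c ((t.getD c []).set ((PySem.List.index? pvSegunda posicion).getD 0) valor), c + 1)
  else if c = 2 ∧ pvTercer.contains posicion then
    (t.set c ((t.getD c []).set ((PySem.List.index? pvTercer posicion).getD 0) valor), c + 1)
  else (t, c + 1)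

def actualizar_tablero (tabla : List (List String)) (posicion : String) (valor : String) : List (List String) :=
  (tabla.foldl (pvStepA posicion valor) (tabla, 0)).1

-- ===== PORT B =====
def pvPosTable : PySem.Dict String (Nat × Nat) :=
  PySem.Dict.mk [("1", (0, 0)), ("2", (0, 1)), ("3", (0, 2)),
                     ("4", (1, 0)), ("5", (1, 1)), ("6", (1, 2)),
                     ("7", (2, 0)), ("8", (2, 1)), ("9", (2, 2))]

def actualizar_tablero_alt (tabla : List (List String)) (posicion : String) (valor : String) : List (List String) :=
  match PySem.Dict.get? pvPosTable posicion with
  | some rc =>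
      if rc.1 < tabla.length then
        tabla.set rc.1 ((tabla.getD rc.1 []).set rc.2 valor)
      else tabla
  | none => tabla

-- ===== PRECONDITION & SPEC =====
-- Pre_ excludes exactly the inputs on which both Pythons raise IndexError: a valid
-- position whose target row exists but is too short to hold the addressed column.
def Pre_actualizar_tablero (tabla : List (List String)) (posicion : String) (valor : String) : Prop :=
  ∀ rc ∈ ([("1", ((0 : Nat), (0 : Nat))), ("2", (0, 1)), ("3", (0, 2)),
           ("4", (1, 0)), ("5", (1, 1)), ("6", (1, 2)),
           ("7", (2, 0)), ("8", (2, 1)), ("9", (2, 2))] : List (String × Nat × Nat)),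
    posicion = rc.1 → rc.2.1 < tabla.length → rc.2.2 < (tabla.getD rc.2.1 []).length
instance (tabla : List (List String)) (posicion : String) (valor : String) : Decidable (Pre_actualizar_tablero tabla posicion valor) := by unfold Pre_actualizar_tablero; infer_instance

def pvWitness_actualizar_tablero : List (List String) × String × String :=
  ([["a", "b", "c"], ["d", "e", "f"], ["g", "h", "i"]], "5", "X")

def Spec_actualizar_tablero (tabla : List (List String)) (posicion : String) (valor : String) (out : List (List String)) : Prop := out = actualizar_tablero_alt tabla posicion valor
instance (tabla : List (List String)) (posicion : String) (valor : String) (out : List (List String)) : Decidable (Spec_actualizar_tablero tabla posicion valor out) := by unfold Spec_actualizar_tablero; infer_instance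

-- ===== CLAIM (what is proved, stated in full; the proofs are below) =====
def Claim_equal_actualizar_tablero : Prop := ∀ (tabla : List (List String)) (posicion : String) (valor : String), Dom_actualizar_tablero tabla posicion valor → Pre_actualizar_tablero tabla posicion valor → Spec_actualizar_tablero tabla posicion valor (actualizar_tablero tabla posicion valor)

-- ===== LEMMAS AND PROOFS =====

-- once the counter has passed row 2, every remaining iteration of A's loop is a no-op on the board
theorem pvStepA_tail (posicion valor : String) (rest : List (List String))
    (t : List (List String)) (c : Nat) (h : 3 ≤ c) :
    rest.foldl (pvStepA posicion valor) (t, c) = (t, c + rest.length) := by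
  induction rest generalizing c with
  | nil => simp
  | cons a l ih =>
      have h0 : ¬ c = 0 := by omega
      have h1 : ¬ c = 1 := by omega
      have h2 : ¬ c = 2 := by omega
      simp only [List.foldl, pvStepA, h0, h1, h2, false_and, if_false]
      rw [ih (c + 1) (by omega)]
      simp; omega

-- if posicion is none of the nine valid strings, every iteration of A's loop is a no-op on the board
theorem pvStepA_skip (posicion valor : String)
    (hp : pvPrimer.contains posicion = false)
    (hs : pvSegunda.contains posicion = false)
    (ht : pvTercer.contains posicion = false)
    (rest : List (List String)) (t : List (List String)) (c : Nat) :
    rest.foldl (pvStepA posicion valor) (t, c) = (t, c + rest.length) := by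
  induction rest generalizing c with
  | nil => simp
  | cons a l ih =>
      simp only [List.foldl, pvStepA, hp, hs, ht, Bool.false_eq_true, and_false, if_false]
      rw [ih (c + 1)]
      simp; omega

-- ===== VERDICT (by name: the statement is the Claim_ definition above) =====
theorem actualizar_tablero_spec : Claim_equal_actualizar_tablero := by
  intro tabla posicion valor _ _
  unfold Spec_actualizar_tablero actualizar_tablero actualizar_tablero_alt
  by_cases h1 : posicion = "1"
  · subst h1
    have hg : PySem.Dict.get? pvPosTable "1" = some (0, 0) := by decide
    match tabla with
    | [] => simp [hg]
    | [a] => simp [hg, pvStepA, pvPrimer, pvSegunda, pvTercer, List.foldl, List.idxOf?,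
                   List.findIdx?, List.findIdx?.go]
    | [a, b] => simp [hg, pvStepA, pvPrimer, pvSegunda, pvTercer, List.foldl, List.idxOf?,
                      List.findIdx?, List.findIdx?.go]
    | a :: b :: d :: rest =>
        simp only [List.foldl]
        simp [pvStepA, pvPrimer, pvSegunda, pvTercer, List.idxOf?, List.findIdx?, List.findIdx?.go]
        rw [pvStepA_tail _ _ rest _ 3 (by norm_num)]
        simp [hg]
  by_cases h2 : posicion = "2"
  · subst h2
    have hg : PySem.Dict.get? pvPosTable "2" = some (0, 1) := by decide
    match tabla with
    | [] => simp [hg]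
    | [a] => simp [hg, pvStepA, pvPrimer, pvSegunda, pvTercer, List.foldl, List.idxOf?,
                   List.findIdx?, List.findIdx?.go]
    | [a, b] => simp [hg, pvStepA, pvPrimer, pvSegunda, pvTercer, List.foldl, List.idxOf?,
                      List.findIdx?, List.findIdx?.go]
    | a :: b :: d :: rest =>
        simp only [List.foldl]
        simp [pvStepA, pvPrimer, pvSegunda, pvTercer, List.idxOf?, List.findIdx?, List.findIdx?.go]
        rw [pvStepA_tail _ _ rest _ 3 (by norm_num)]
        simp [hg]
  by_cases h3 : posicion = "3"
  · subst h3
    have hg : PySem.Dict.get? pvPosTable "3" = some (0, 2) := by decide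
    match tabla with
    | [] => simp [hg]
    | [a] => simp [hg, pvStepA, pvPrimer, pvSegunda, pvTercer, List.foldl, List.idxOf?,
                   List.findIdx?, List.findIdx?.go]
    | [a, b] => simp [hg, pvStepA, pvPrimer, pvSegunda, pvTercer, List.foldl, List.idxOf?,
                      List.findIdx?, List.findIdx?.go]
    | a :: b :: d :: rest =>
        simp only [List.foldl]
        simp [pvStepA, pvPrimer, pvSegunda, pvTercer, List.idxOf?, List.findIdx?, List.findIdx?.go]
        rw [pvStepA_tail _ _ rest _ 3 (by norm_num)]
        simp [hg]
  by_cases h4 : posicion = "4"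
  · subst h4
    have hg : PySem.Dict.get? pvPosTable "4" = some (1, 0) := by decide
    match tabla with
    | [] => simp [hg]
    | [a] => simp [hg, pvStepA, pvPrimer, pvSegunda, pvTercer, List.foldl, List.idxOf?,
                   List.findIdx?, List.findIdx?.go]
    | [a, b] => simp [hg, pvStepA, pvPrimer, pvSegunda, pvTercer, List.foldl, List.idxOf?,
                      List.findIdx?, List.findIdx?.go]
    | a :: b :: d :: rest =>
        simp only [List.foldl]
        simp [pvStepA, pvPrimer, pvSegunda, pvTercer, List.idxOf?, List.findIdx?, List.findIdx?.go]
        rw [pvStepA_tail _ _ rest _ 3 (by norm_num)]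
        simp [hg]
  by_cases h5 : posicion = "5"
  · subst h5
    have hg : PySem.Dict.get? pvPosTable "5" = some (1, 1) := by decide
    match tabla with
    | [] => simp [hg]
    | [a] => simp [hg, pvStepA, pvPrimer, pvSegunda, pvTercer, List.foldl, List.idxOf?,
                   List.findIdx?, List.findIdx?.go]
    | [a, b] => simp [hg, pvStepA, pvPrimer, pvSegunda, pvTercer, List.foldl, List.idxOf?,
                      List.findIdx?, List.findIdx?.go]
    | a :: b :: d :: rest =>
        simp only [List.foldl]
        simp [pvStepA, pvPrimer, pvSegunda, pvTercer, List.idxOf?, List.findIdx?, List.findIdx?.go]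
        rw [pvStepA_tail _ _ rest _ 3 (by norm_num)]
        simp [hg]
  by_cases h6 : posicion = "6"
  · subst h6
    have hg : PySem.Dict.get? pvPosTable "6" = some (1, 2) := by decide
    match tabla with
    | [] => simp [hg]
    | [a] => simp [hg, pvStepA, pvPrimer, pvSegunda, pvTercer, List.foldl, List.idxOf?,
                   List.findIdx?, List.findIdx?.go]
    | [a, b] => simp [hg, pvStepA, pvPrimer, pvSegunda, pvTercer, List.foldl, List.idxOf?,
                      List.findIdx?, List.findIdx?.go]
    | a :: b :: d :: rest =>
        simp only [List.foldl]
        simp [pvStepA, pvPrimer, pvSegunda, pvTercer, List.idxOf?, List.findIdx?, List.findIdx?.go]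
        rw [pvStepA_tail _ _ rest _ 3 (by norm_num)]
        simp [hg]
  by_cases h7 : posicion = "7"
  · subst h7
    have hg : PySem.Dict.get? pvPosTable "7" = some (2, 0) := by decide
    match tabla with
    | [] => simp [hg]
    | [a] => simp [hg, pvStepA, pvPrimer, pvSegunda, pvTercer, List.foldl, List.idxOf?,
                   List.findIdx?, List.findIdx?.go]
    | [a, b] => simp [hg, pvStepA, pvPrimer, pvSegunda, pvTercer, List.foldl, List.idxOf?,
                      List.findIdx?, List.findIdx?.go]
    | a :: b :: d :: rest =>
        simp only [List.foldl]
        simp [pvStepA, pvPrimer, pvSegunda, pvTercer, List.idxOf?, List.findIdx?, List.findIdx?.go]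
        rw [pvStepA_tail _ _ rest _ 3 (by norm_num)]
        simp [hg]
  by_cases h8 : posicion = "8"
  · subst h8
    have hg : PySem.Dict.get? pvPosTable "8" = some (2, 1) := by decide
    match tabla with
    | [] => simp [hg]
    | [a] => simp [hg, pvStepA, pvPrimer, pvSegunda, pvTercer, List.foldl, List.idxOf?,
                   List.findIdx?, List.findIdx?.go]
    | [a, b] => simp [hg, pvStepA, pvPrimer, pvSegunda, pvTercer, List.foldl, List.idxOf?,
                      List.findIdx?, List.findIdx?.go]
    | a :: b :: d :: rest =>
        simp only [List.foldl]
        simp [pvStepA, pvPrimer, pvSegunda, pvTercer, List.idxOf?, List.findIdx?, List.findIdx?.go]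
        rw [pvStepA_tail _ _ rest _ 3 (by norm_num)]
        simp [hg]
  by_cases h9 : posicion = "9"
  · subst h9
    have hg : PySem.Dict.get? pvPosTable "9" = some (2, 2) := by decide
    match tabla with
    | [] => simp [hg]
    | [a] => simp [hg, pvStepA, pvPrimer, pvSegunda, pvTercer, List.foldl, List.idxOf?,
                   List.findIdx?, List.findIdx?.go]
    | [a, b] => simp [hg, pvStepA, pvPrimer, pvSegunda, pvTercer, List.foldl, List.idxOf?,
                      List.findIdx?, List.findIdx?.go]
    | a :: b :: d :: rest =>
        simp only [List.foldl]
        simp [pvStepA, pvPrimer, pvSegunda, pvTercer, List.idxOf?, List.findIdx?, List.findIdx?.go]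
        rw [pvStepA_tail _ _ rest _ 3 (by norm_num)]
        simp [hg]
  have e1 : ¬ ("1" = posicion) := fun h => h1 h.symm
  have e2 : ¬ ("2" = posicion) := fun h => h2 h.symm
  have e3 : ¬ ("3" = posicion) := fun h => h3 h.symm
  have e4 : ¬ ("4" = posicion) := fun h => h4 h.symm
  have e5 : ¬ ("5" = posicion) := fun h => h5 h.symm
  have e6 : ¬ ("6" = posicion) := fun h => h6 h.symm
  have e7 : ¬ ("7" = posicion) := fun h => h7 h.symm
  have e8 : ¬ ("8" = posicion) := fun h => h8 h.symm
  have e9 : ¬ ("9" = posicion) := fun h => h9 h.symm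
  have hp : pvPrimer.contains posicion = false := by
    simp [pvPrimer]
    exact ⟨h1, h2, h3⟩
  have hs : pvSegunda.contains posicion = false := by
    simp [pvSegunda]
    exact ⟨h4, h5, h6⟩
  have ht : pvTercer.contains posicion = false := by
    simp [pvTercer]
    exact ⟨h7, h8, h9⟩
  have hg : PySem.Dict.get? pvPosTable posicion = none := by
    simp [pvPosTable, PySem.Dict.get?_mk_cons, PySem.Dict.get?, e1, e2, e3, e4, e5, e6, e7, e8, e9]
  rw [pvStepA_skip posicion valor hp hs ht]
  simp [hg]
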